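-- pv_equiv track=rewrite | github.com/SebinYu-hub/PS2 | solution/30.py | solution
-- ===== SOURCE A (Python) =====
-- from collections import deque
--
-- DIRECTIONS = {
--     'up': (-1, 0),
--     'down': (1, 0),
--     'left': (0, -1),
--     'right': (0, 1)
-- }
--
-- def find_points(maps):
--     """시작점, 도착점, 레버 위치를 한 번의 순회로 찾기
--
--     Args:
--         maps (List[str]): 맵을 나타내는 문자열 리스트
--
--     Returns:
--         Tuple[Tuple[int, int]]: (시작점, 도착점, 레버) 좌표
--     """
--     points = {'S': None, 'E': None, 'L': None}
--
--     # 리스트 컴프리헨션과 enumerate 활용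
--     points.update({
--         maps[i][j]: (i, j)
--         for i, row in enumerate(maps)
--         for j, cell in enumerate(row)
--         if cell in points
--     })
--
--     return points['S'], points['E'], points['L']
--
-- def is_valid_move(ny, nx, n, m, maps):
--     """이동 가능한 좌표인지 판단하는 함수"""
--     return 0 <= ny < n and 0 <= nx < m and maps[ny][nx] != "X"
--
-- def append_to_queue(ny, nx, k, time, visited, q):
--     """방문한 적이 없으면 큐에 넣고 방문 여부 표시"""
--     if not visited[ny][nx][k]:
--         visited[ny][nx][k] = True
--         q.append((ny, nx, k, time + 1))
--
-- def solution(maps):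
--     n, m = len(maps), len(maps[0])
--     visited = [[[False] * 2 for _ in range(m)] for _ in range(n)]
--
--     # 시작점, 도착점, 레버 위치를 한 번에 찾기
--     start, end, lever = find_points(maps)
--     if not all((start, end, lever)):
--         return -1  # 필요한 지점이 없는 경우
--
--     q = deque([(start[0], start[1], 0, 0)])  # y, x, 레버상태, 시간
--     visited[start[0]][start[1]][0] = True
--
--     while q:
--         y, x, k, time = q.popleft()
--
--         if y == end[0] and x == end[1] and k == 1:
--             return time
--
--         # 방향 이동을 더 명확하게 표현
--         for dy, dx in DIRECTIONS.values():
--             ny, nx = y + dy, x + dx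
--
--             if not is_valid_move(ny, nx, n, m, maps):
--                 continue
--
--             # 레버 위치 도달 여부를 좌표 비교로 변경
--             if (ny, nx) == lever:
--                 append_to_queue(ny, nx, 1, time, visited, q)
--             else:
--                 append_to_queue(ny, nx, k, time, visited, q)
--
--     return -1  # 도착 불가능
-- ===== SOURCE B (Python) =====
-- def solution(maps):
--     n, m = len(maps), len(maps[0])
--
--     start = end = lever = None
--     for i, row in enumerate(maps):
--         for j, c in enumerate(row):
--             if c == 'S':
--                 start = (i, j)
--             elif c == 'E':
--                 end = (i, j)
--             elif c == 'L':
--                 lever = (i, j)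
--     if start is None or end is None or lever is None:
--         return -1
--
--     def bfs(src, dst):
--         """Plain grid BFS by frontier levels; shortest distance src->dst or -1."""
--         if src == dst:
--             return 0
--         seen = {src}
--         frontier = [src]
--         d = 0
--         while frontier:
--             d += 1
--             nxt = []
--             for (y, x) in frontier:
--                 for dy, dx in ((-1, 0), (1, 0), (0, -1), (0, 1)):
--                     ny, nx = y + dy, x + dx
--                     if 0 <= ny < n and 0 <= nx < m and maps[ny][nx] != 'X' and (ny, nx) not in seen:
--                         seen.add((ny, nx))
--                         nxt.append((ny, nx))
--             if dst in nxt: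
--                 return d
--             frontier = nxt
--         return -1
--
--     d1 = bfs(start, lever)
--     if d1 == -1:
--         return -1
--     d2 = bfs(lever, end)
--     if d2 == -1:
--         return -1
--     return d1 + d2
-- ===== Notes on version B (the rewrite author's own statement) =====
-- stated objective: simpler
-- what changed: Replaces A's single BFS over (y, x, lever-state) triples with two ordinary grid BFS passes (start->lever, then lever->exit) whose distances are summed, dropping the lever-state dimension entirely.
-- outside the precondition, e.g. on solution(['SE', 'LOO']): A returns 3, B returns 3
import Mathlib
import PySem

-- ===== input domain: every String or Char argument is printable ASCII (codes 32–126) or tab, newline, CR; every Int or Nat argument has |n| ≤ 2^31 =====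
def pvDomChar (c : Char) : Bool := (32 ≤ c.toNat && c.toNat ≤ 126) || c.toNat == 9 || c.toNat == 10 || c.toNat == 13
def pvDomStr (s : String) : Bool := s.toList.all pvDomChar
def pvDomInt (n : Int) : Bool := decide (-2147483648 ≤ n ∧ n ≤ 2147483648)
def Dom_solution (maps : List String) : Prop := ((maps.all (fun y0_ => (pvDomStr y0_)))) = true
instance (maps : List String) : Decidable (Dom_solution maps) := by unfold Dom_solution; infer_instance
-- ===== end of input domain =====

-- B replaces A's single BFS over (y, x, lever-state) states by two plain grid BFS passes
-- (start→lever, lever→exit) whose distances are summed: a simpler decomposition, same exact value.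
-- (Equivalence is about the return value; neither program mutates its argument.)

-- ===== PORT A =====

-- DIRECTIONS.values(), in dict insertion order
def pvDirs : List (Int × Int) := [(-1, 0), (1, 0), (0, -1), (0, 1)]

-- maps[y][x] as an Option (none = IndexError); in-range everywhere A evaluates it under Pre_
def pvCell (maps : List String) (y x : Int) : Option Char :=
  (PySem.List.pyGet? maps y).bind (fun row => PySem.Str.pyGet? row x)

def is_valid_move (ny nx n m : Int) (maps : List String) : Bool :=
  decide (0 ≤ ny) && decide (ny < n) && decide (0 ≤ nx) && decide (nx < m) &&
    decide (pvCell maps ny nx ≠ some 'X')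

-- find_points: the dict {'S': None, 'E': None, 'L': None} updated by the row-major comprehension
-- (update of an existing key = overwrite in place, so each letter keeps its LAST occurrence)
def find_points (maps : List String) :
    Option (Int × Int) × Option (Int × Int) × Option (Int × Int) :=
  let d0 : PySem.Dict Char (Option (Int × Int)) :=
    PySem.Dict.ofList [('S', none), ('E', none), ('L', none)]
  let d := (PySem.List.enumerate maps).foldl (fun d ir =>
    (PySem.List.enumerate ir.2.toList).foldl (fun d jc =>
      if d.contains jc.2 then d.insert jc.2 (some (ir.1, jc.1)) else d) d) d0
  (d.getD 'S' none, d.getD 'E' none, d.getD 'L' none)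

-- the body of `for dy, dx in DIRECTIONS.values()` before the visited test: the states that get
-- offered to append_to_queue for a popped (y, x, k), in direction order
def pvNexts (maps : List String) (n m : Int) (lever : Int × Int)
    (s : Int × Int × Int) : List (Int × Int × Int) :=
  pvDirs.foldl (fun acc dir =>
    if is_valid_move (s.1 + dir.1) (s.2.1 + dir.2) n m maps then
      acc ++ [if (s.1 + dir.1, s.2.1 + dir.2) = lever then (s.1 + dir.1, s.2.1 + dir.2, 1)
              else (s.1 + dir.1, s.2.1 + dir.2, s.2.2)]
    else acc) []

-- `while q:` — each round pops (y, x, k, time), tests the goal, then append_to_queue marks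
-- unvisited states and pushes them (visited ported as the list of marked states; marking =
-- appending, `visited[ny][nx][k]` = membership — the same booleans A's 3-D array stores).
-- fuel bounds the number of pops; 2*n*m+1 is proven sufficient below (≤ one pop per marked state).
def solutionLoop (maps : List String) (n m : Int) (lever : Int × Int) (goal : Int × Int × Int) :
    Nat → List ((Int × Int × Int) × Int) → List (Int × Int × Int) → Int
  | _, [], _ => -1
  | 0, _ :: _, _ => -1
  | fuel + 1, (s, time) :: q, visited =>
    if s = goal then time
    else
      let r := (pvNexts maps n m lever s).foldl
        (fun (acc : List ((Int × Int × Int) × Int) × List (Int × Int × Int)) x =>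
          if x ∈ acc.2 then acc else (acc.1 ++ [(x, time + 1)], acc.2 ++ [x]))
        (q, visited)
      solutionLoop maps n m lever goal fuel r.1 r.2

def solution (maps : List String) : Int :=
  let n : Int := PySem.List.len maps
  let m : Int := PySem.Str.len (maps.headD "")   -- len(maps[0]); maps = [] raises (outside Pre_)
  match find_points maps with
  | (some start, some endp, some lever) =>
    solutionLoop maps n m lever (endp.1, endp.2, 1)
      (2 * maps.length * (maps.headD "").toList.length + 1)
      [((start.1, start.2, 0), 0)]
      [(start.1, start.2, 0)]
  | _ => -1   -- `if not all((start, end, lever)): return -1`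

-- ===== PORT B =====

-- the explicit if/elif scan of Source B: three accumulators, overwritten in row-major order
def find_points_alt (maps : List String) :
    Option (Int × Int) × Option (Int × Int) × Option (Int × Int) :=
  (PySem.List.enumerate maps).foldl (fun acc ir =>
    (PySem.List.enumerate ir.2.toList).foldl
      (fun (acc : Option (Int × Int) × Option (Int × Int) × Option (Int × Int)) jc =>
        if jc.2 = 'S' then (some (ir.1, jc.1), acc.2.1, acc.2.2)
        else if jc.2 = 'E' then (acc.1, some (ir.1, jc.1), acc.2.2)
        else if jc.2 = 'L' then (acc.1, acc.2.1, some (ir.1, jc.1))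
        else acc) acc) (none, none, none)

-- Source B's `while frontier:` — one round expands the whole frontier (acc = (nxt, seen)), then
-- tests `dst in nxt`; d is the running distance.  fuel bounds the rounds (n*m+1 suffices).
def bfsLoopAlt (maps : List String) (n m : Int) (dst : Int × Int) :
    Nat → List (Int × Int) → List (Int × Int) → Int → Int
  | _, [], _, _ => -1
  | 0, _ :: _, _, _ => -1
  | fuel + 1, frontier@(_ :: _), seen, d =>
    let r := frontier.foldl (fun (acc : List (Int × Int) × List (Int × Int)) p =>
      pvDirs.foldl (fun (acc : List (Int × Int) × List (Int × Int)) dir =>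
        let q := (p.1 + dir.1, p.2 + dir.2)
        if (0 ≤ q.1 ∧ q.1 < n ∧ 0 ≤ q.2 ∧ q.2 < m ∧ pvCell maps q.1 q.2 ≠ some 'X')
            ∧ q ∉ acc.2 then
          (acc.1 ++ [q], acc.2 ++ [q])
        else acc) acc) ([], seen)
    if dst ∈ r.1 then d + 1 else bfsLoopAlt maps n m dst fuel r.1 r.2 (d + 1)

def solution_alt (maps : List String) : Int :=
  let n : Int := PySem.List.len maps
  let m : Int := PySem.Str.len (maps.headD "")
  let fp := find_points_alt maps
  -- `if start is None or end is None or lever is None: return -1`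
  match fp.1 with
  | none => -1
  | some s =>
    match fp.2.1 with
    | none => -1
    | some e =>
      match fp.2.2 with
      | none => -1
      | some l =>
        let bfs : Int × Int → Int × Int → Int := fun src dst =>
          if src = dst then 0
          else bfsLoopAlt maps n m dst (maps.length * (maps.headD "").toList.length + 1) [src] [src] 0
        let d1 := bfs s l
        if d1 = -1 then -1
        else
          let d2 := bfs l e
          if d2 = -1 then -1 else d1 + d2

-- ===== PRECONDITION & SPEC =====

-- Pre_ excludes the empty list (len(maps[0]) raises IndexError) and, when all of 'S','E','L' are
-- present (so A actually runs its BFS), ragged maps: A's bounds check uses len(maps[0]) for every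
-- row, so there A raises IndexError whenever the search steps past the end of a shorter row (a few
-- such ragged maps happen to return before reaching one).
def Pre_solution (maps : List String) : Prop :=
  maps ≠ [] ∧
    ((∃ r ∈ maps, 'S' ∈ r.toList) ∧ (∃ r ∈ maps, 'E' ∈ r.toList) ∧ (∃ r ∈ maps, 'L' ∈ r.toList) →
      ∀ r ∈ maps, r.toList.length = (maps.headD "").toList.length)

instance (maps : List String) : Decidable (Pre_solution maps) := by
  unfold Pre_solution; infer_instance

def pvWitness_solution : List String := ["SL", "EO"]

def Spec_solution (maps : List String) (out : Int) : Prop := out = solution_alt maps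
instance (maps : List String) (out : Int) : Decidable (Spec_solution maps out) := by
  unfold Spec_solution; infer_instance

-- ===== CLAIM (what is proved, stated in full; the proofs are below) =====
def Claim_equal_solution : Prop :=
  ∀ (maps : List String), Dom_solution maps → Pre_solution maps →
    Spec_solution maps (solution maps)

-- ===== LEMMAS AND PROOFS =====

-- ---------- generic reachability by levels ----------

def pvBall {α : Type} (succs : α → List α) (src : α) : Nat → α → Prop
  | 0 => fun x => x = src
  | d + 1 => fun x => pvBall succs src d x ∨ ∃ p, pvBall succs src d p ∧ x ∈ succs p

def pvLv {α : Type} (succs : α → List α) (src : α) (d : Nat) (x : α) : Prop :=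
  pvBall succs src d x ∧ ∀ t, t < d → ¬ pvBall succs src t x

theorem pvBall_mono {α : Type} (succs : α → List α) (src : α) {d e : Nat} (h : d ≤ e)
    {x : α} (hx : pvBall succs src d x) : pvBall succs src e x := by
  induction h with
  | refl => exact hx
  | step _ ih => exact Or.inl ih

theorem pvBall_step {α : Type} (succs : α → List α) (src : α) {d : Nat} {p x : α}
    (hp : pvBall succs src d p) (hx : x ∈ succs p) : pvBall succs src (d + 1) x := by
  exact Or.inr ⟨p, hp, hx⟩

theorem pvBall_exists_lv {α : Type} (succs : α → List α) (src : α) {d : Nat} {x : α}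
    (h : pvBall succs src d x) : ∃ t, t ≤ d ∧ pvLv succs src t x := by
  induction d with
  | zero => exact ⟨0, le_rfl, h, by omega⟩
  | succ d ih =>
    by_cases hb : pvBall succs src d x
    · obtain ⟨t, ht, hlv⟩ := ih hb
      exact ⟨t, by omega, hlv⟩
    · by_cases hall : ∀ t, t < d + 1 → ¬ pvBall succs src t x
      · exact ⟨d + 1, le_rfl, h, hall⟩
      · push Not at hall
        obtain ⟨t, ht, hbt⟩ := hall
        have : pvBall succs src d x := pvBall_mono succs src (by omega) hbt
        exact absurd this hb

theorem pvLv_unique {α : Type} (succs : α → List α) (src : α) {d e : Nat} {x : α}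
    (h1 : pvLv succs src d x) (h2 : pvLv succs src e x) : d = e := by
  by_contra hne
  rcases Nat.lt_or_ge d e with h | h
  · exact h2.2 d h h1.1
  · have : e < d := by omega
    exact h1.2 e this h2.1

theorem pvLv_zero {α : Type} (succs : α → List α) (src : α) (x : α) :
    pvLv succs src 0 x ↔ x = src := by
  constructor
  · intro h; exact h.1
  · intro h; exact ⟨h, by omega⟩

-- a state of exact level d+1 has a parent of exact level d
theorem pvLv_pred {α : Type} (succs : α → List α) (src : α) {d : Nat} {x : α}
    (h : pvLv succs src (d + 1) x) : ∃ p, pvLv succs src d p ∧ x ∈ succs p := by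
  rcases h.1 with hb | ⟨p, hp, hx⟩
  · exact absurd hb (h.2 d (by omega))
  · obtain ⟨t, ht, hlv⟩ := pvBall_exists_lv succs src hp
    have htd : t = d := by
      rcases Nat.lt_or_ge t d with h' | h'
      · exact absurd (pvBall_step succs src hlv.1 hx) (h.2 (t + 1) (by omega))
      · omega
    exact ⟨p, htd ▸ hlv, hx⟩

theorem pvLv_descend {α : Type} (succs : α → List α) (src : α) {d t : Nat} (hdt : d ≤ t)
    {x : α} (h : pvLv succs src t x) : ∃ y, pvLv succs src d y := by
  induction t generalizing x with
  | zero => exact ⟨x, by rw [(by omega : d = 0)]; exact h⟩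
  | succ t ih =>
    rcases Nat.lt_or_ge d (t + 1) with h' | h'
    · obtain ⟨p, hp, _⟩ := pvLv_pred succs src h
      exact ih (by omega) hp
    · exact ⟨x, by rw [(by omega : d = t + 1)]; exact h⟩

-- if no state has exact level d, nothing new is ever reached after d
theorem pvBall_stab {α : Type} (succs : α → List α) (src : α) {d : Nat}
    (hempty : ∀ y, ¬ pvLv succs src d y) {t : Nat} {x : α}
    (h : pvBall succs src t x) : ∃ t', t' < d ∧ pvBall succs src t' x := by
  obtain ⟨t, ht, hlv⟩ := pvBall_exists_lv succs src h
  rcases Nat.lt_or_ge t d with h' | h'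
  · exact ⟨t, h', hlv.1⟩
  · obtain ⟨y, hy⟩ := pvLv_descend succs src h' hlv
    exact absurd hy (hempty y)

-- ---------- the first-discovery filter shared by both loops ----------

def pvNews {α : Type} [BEq α] [LawfulBEq α] : List α → List α → List α
  | [], _ => []
  | x :: xs, vis => if x ∈ vis then pvNews xs vis else x :: pvNews xs (vis ++ [x])

theorem mem_pvNews {α : Type} [BEq α] [LawfulBEq α] (l : List α) (vis : List α) (x : α) :
    x ∈ pvNews l vis ↔ x ∈ l ∧ x ∉ vis := by
  induction l generalizing vis with
  | nil => simp [pvNews]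
  | cons a l ih =>
    by_cases ha : a ∈ vis
    · rw [pvNews, if_pos ha, ih]
      constructor
      · exact fun h => ⟨List.mem_cons_of_mem _ h.1, h.2⟩
      · rintro ⟨h1, h2⟩
        rcases List.mem_cons.mp h1 with rfl | h1
        exacts [absurd ha h2, ⟨h1, h2⟩]
    · rw [pvNews, if_neg ha]
      simp only [List.mem_cons, ih, List.mem_append]
      by_cases hx : x = a
      · simp [hx, ha]
      · simp [hx]

theorem nodup_append_pvNews {α : Type} [BEq α] [LawfulBEq α] (l : List α) (vis : List α)
    (h : vis.Nodup) : (vis ++ pvNews l vis).Nodup := by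
  induction l generalizing vis with
  | nil => simpa [pvNews]
  | cons a l ih =>
    by_cases ha : a ∈ vis
    · simpa [pvNews, if_pos ha] using ih vis h
    · have h' : (vis ++ [a]).Nodup := by
        refine List.Nodup.append h (List.nodup_singleton a) ?_
        intro b hb hb'
        rw [List.mem_singleton] at hb'
        subst hb'
        exact ha hb
      have := ih (vis ++ [a]) h'
      simpa [pvNews, if_neg ha, List.append_assoc] using this

theorem foldPush {α β : Type} [BEq α] [LawfulBEq α] (f : α → β) (l : List α) (q : List β)
    (vis : List α) :
    l.foldl (fun (acc : List β × List α) x =>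
        if x ∈ acc.2 then acc else (acc.1 ++ [f x], acc.2 ++ [x])) (q, vis) =
      (q ++ (pvNews l vis).map f, vis ++ pvNews l vis) := by
  induction l generalizing q vis with
  | nil => simp [pvNews]
  | cons a l ih =>
    by_cases ha : a ∈ vis
    · simp only [List.foldl_cons, if_pos ha, pvNews, ih]
    · simp [List.foldl_cons, if_neg ha, pvNews, ih]

-- ---------- queue-BFS invariant (A's loop) ----------

structure PvQInv {α : Type} [BEq α] [LawfulBEq α] (succs : α → List α) (goal src : α)
    (states : List α) (d : Nat) (P : List α) (q1 q2 : List (α × Int)) (vis : List α) : Prop where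
  ht1 : ∀ e ∈ q1, e.2 = (d : Int)
  ht2 : ∀ e ∈ q2, e.2 = (d : Int) + 1
  hnd1 : (q1.map Prod.fst).Nodup
  hnd2 : (q2.map Prod.fst).Nodup
  hq1 : ∀ x, x ∈ q1.map Prod.fst ↔ (pvLv succs src d x ∧ x ∉ P)
  hq2 : ∀ x ∈ q2.map Prod.fst, pvLv succs src (d + 1) x
  hq2c : ∀ x, ¬ pvBall succs src d x → (∃ p ∈ P, x ∈ succs p) → x ∈ q2.map Prod.fst
  hP : ∀ p ∈ P, pvLv succs src d p
  hvis : ∀ x, x ∈ vis ↔ (pvBall succs src d x ∨ x ∈ q2.map Prod.fst)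
  hvisnd : vis.Nodup
  hvisS : vis ⊆ states
  hgoal1 : ∀ t, t < d → ¬ pvBall succs src t goal
  hgoal2 : goal ∉ P

theorem pvBall_succ_iff_lv {α : Type} (succs : α → List α) (src : α) (d : Nat) (x : α) :
    pvBall succs src (d + 1) x ↔ pvBall succs src d x ∨ pvLv succs src (d + 1) x := by
  constructor
  · intro h
    by_cases hb : pvBall succs src d x
    · exact Or.inl hb
    · refine Or.inr ⟨h, fun t ht hbt => hb (pvBall_mono succs src (by omega) hbt)⟩
  · rintro (h | h)
    · exact pvBall_mono succs src (by omega) h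
    · exact h.1

theorem pvQInv_goal_level {α : Type} [BEq α] [LawfulBEq α] {succs : α → List α} {goal src : α}
    {states : List α} {d : Nat} {P : List α} {q2 : List (α × Int)} {vis : List α}
    (h : PvQInv succs goal src states d P [] q2 vis) : ¬ pvBall succs src d goal := by
  intro hb
  obtain ⟨t, ht, hlv⟩ := pvBall_exists_lv succs src hb
  rcases Nat.lt_or_ge t d with h' | h'
  · exact h.hgoal1 t h' hlv.1
  · have htd : t = d := by omega
    subst htd
    have := (h.hq1 goal).mpr
    by_cases hp : goal ∈ P
    · exact h.hgoal2 hp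
    · simpa using this ⟨hlv, hp⟩

theorem pvQInv_q2_complete {α : Type} [BEq α] [LawfulBEq α] {succs : α → List α} {goal src : α}
    {states : List α} {d : Nat} {P : List α} {q2 : List (α × Int)} {vis : List α}
    (h : PvQInv succs goal src states d P [] q2 vis) :
    ∀ x, pvLv succs src (d + 1) x → x ∈ q2.map Prod.fst := by
  intro x hx
  obtain ⟨p, hp, hxp⟩ := pvLv_pred succs src hx
  have hpP : p ∈ P := by
    by_cases hp' : p ∈ P
    · exact hp'
    · simpa using (h.hq1 p).mpr ⟨hp, hp'⟩
  exact h.hq2c x (hx.2 d (by omega)) ⟨p, hpP, hxp⟩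

theorem pvQInv_shift {α : Type} [BEq α] [LawfulBEq α] {succs : α → List α} {goal src : α}
    {states : List α} {d : Nat} {P : List α} {q2 : List (α × Int)} {vis : List α}
    (h : PvQInv succs goal src states d P [] q2 vis) :
    PvQInv succs goal src states (d + 1) [] q2 [] vis := by
  have hq2iff : ∀ x, x ∈ q2.map Prod.fst ↔ pvLv succs src (d + 1) x :=
    fun x => ⟨h.hq2 x, pvQInv_q2_complete h x⟩
  have hgd : ¬ pvBall succs src d goal := pvQInv_goal_level h
  refine ⟨?_, ?_, ?_, ?_, ?_, ?_, ?_, ?_, ?_, h.hvisnd, h.hvisS, ?_, ?_⟩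
  · intro e he
    have := h.ht2 e he
    omega
  · simp
  · exact h.hnd2
  · simp
  · intro x
    rw [hq2iff x]
    simp
  · simp
  · simp
  · simp
  · intro x
    rw [h.hvis x, hq2iff x, pvBall_succ_iff_lv]
    simp
  · intro t ht
    rcases Nat.lt_or_ge t d with h' | h'
    · exact h.hgoal1 t h'
    · have : t = d := by omega
      subst this
      exact hgd
  · simp

theorem pvQInv_dead {α : Type} [BEq α] [LawfulBEq α] {succs : α → List α} {goal src : α}
    {states : List α} {d : Nat} {P : List α} {vis : List α}
    (h : PvQInv succs goal src states d P [] [] vis) :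
    ∀ t, ¬ pvBall succs src t goal := by
  have hempty : ∀ y, ¬ pvLv succs src (d + 1) y := by
    intro y hy
    simpa using pvQInv_q2_complete h y hy
  have hgd : ¬ pvBall succs src d goal := pvQInv_goal_level h
  intro t hb
  obtain ⟨t', ht', hb'⟩ := pvBall_stab succs src hempty hb
  rcases Nat.lt_or_ge t' d with h' | h'
  · exact h.hgoal1 t' h' hb'
  · have : t' = d := by omega
    subst this
    exact hgd hb'

theorem pvQInv_step {α : Type} [BEq α] [LawfulBEq α] {succs : α → List α} {goal src : α}
    {states : List α} {d : Nat} {P : List α} {s : α} {τ : Int} {q1 : List (α × Int)}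
    {q2 : List (α × Int)} {vis : List α}
    (h : PvQInv succs goal src states d P ((s, τ) :: q1) q2 vis) (hs : s ≠ goal)
    (hcl : ∀ p ∈ states, ∀ x ∈ succs p, x ∈ states) :
    PvQInv succs goal src states d (P ++ [s]) q1
      (q2 ++ (pvNews (succs s) vis).map (fun x => (x, (d : Int) + 1)))
      (vis ++ pvNews (succs s) vis) := by
  have hmemnews : ∀ x, x ∈ pvNews (succs s) vis ↔ x ∈ succs s ∧ x ∉ vis :=
    fun x => mem_pvNews _ _ x
  have hndcomb := nodup_append_pvNews (succs s) vis h.hvisnd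
  have hnddisj := (List.nodup_append.mp hndcomb)
  have hndnews : (pvNews (succs s) vis).Nodup := hnddisj.2.1
  have hdisj : ∀ x ∈ vis, x ∉ pvNews (succs s) vis := fun x hx hy => hnddisj.2.2 x hx x hy rfl
  have hsq1 : s ∈ ((s, τ) :: q1).map Prod.fst := by simp
  have hslv : pvLv succs src d s ∧ s ∉ P := (h.hq1 s).mp hsq1
  have hsnot : s ∉ q1.map Prod.fst := by
    have := h.hnd1
    simp only [List.map_cons, List.nodup_cons] at this
    exact this.1
  have hmapfst : (((pvNews (succs s) vis).map (fun x => (x, (d : Int) + 1))).map Prod.fst) =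
      pvNews (succs s) vis := by
    simp [List.map_map, Function.comp_def]
  have hvisball : ∀ x, pvBall succs src d x → x ∈ vis := fun x hx => (h.hvis x).mpr (Or.inl hx)
  have hnewslv : ∀ x ∈ pvNews (succs s) vis, pvLv succs src (d + 1) x := by
    intro x hx
    obtain ⟨hxs, hxv⟩ := (hmemnews x).mp hx
    have hb1 : pvBall succs src (d + 1) x := pvBall_step succs src hslv.1.1 hxs
    refine ⟨hb1, fun t ht hbt => hxv (hvisball x (pvBall_mono succs src (by omega) hbt))⟩
  refine ⟨?_, ?_, ?_, ?_, ?_, ?_, ?_, ?_, ?_, ?_, ?_, h.hgoal1, ?_⟩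
  · exact fun e he => h.ht1 e (List.mem_cons_of_mem _ he)
  · intro e he
    rw [List.mem_append] at he
    rcases he with he | he
    · exact h.ht2 e he
    · rw [List.mem_map] at he
      obtain ⟨x, _, rfl⟩ := he
      rfl
  · have := h.hnd1
    simp only [List.map_cons, List.nodup_cons] at this
    exact this.2
  · rw [List.map_append, hmapfst, List.nodup_append]
    refine ⟨h.hnd2, hndnews, ?_⟩
    intro x hx y hy
    rintro rfl
    exact hdisj x ((h.hvis x).mpr (Or.inr hx)) hy
  · intro x
    constructor
    · intro hx
      have hx' := (h.hq1 x).mp (List.mem_cons_of_mem _ (by simpa using hx))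
      refine ⟨hx'.1, ?_⟩
      rw [List.mem_append]
      rintro (hP | hxs)
      · exact hx'.2 hP
      · rw [List.mem_singleton] at hxs
        subst hxs
        exact hsnot hx
    · rintro ⟨hlv, hnP⟩
      have hnP' : x ∉ P := fun hh => hnP (List.mem_append.mpr (Or.inl hh))
      have hxs : x ≠ s := fun hh => hnP (List.mem_append.mpr (Or.inr (by simp [hh])))
      have := (h.hq1 x).mpr ⟨hlv, hnP'⟩
      simp only [List.map_cons, List.mem_cons] at this
      rcases this with hh | hh
      · exact absurd hh hxs
      · exact hh
  · intro x hx
    rw [List.map_append, hmapfst, List.mem_append] at hx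
    rcases hx with hx | hx
    · exact h.hq2 x hx
    · exact hnewslv x hx
  · intro x hnb hex
    rw [List.map_append, hmapfst, List.mem_append]
    obtain ⟨p, hpP, hxp⟩ := hex
    rw [List.mem_append] at hpP
    rcases hpP with hpP | hpP
    · exact Or.inl (h.hq2c x hnb ⟨p, hpP, hxp⟩)
    · rw [List.mem_singleton] at hpP
      subst hpP
      by_cases hv : x ∈ vis
      · rcases (h.hvis x).mp hv with hb | hq
        · exact absurd hb hnb
        · exact Or.inl hq
      · exact Or.inr ((hmemnews x).mpr ⟨hxp, hv⟩)
  · intro p hp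
    rw [List.mem_append] at hp
    rcases hp with hp | hp
    · exact h.hP p hp
    · rw [List.mem_singleton] at hp
      subst hp
      exact hslv.1
  · intro x
    rw [List.mem_append, List.map_append, hmapfst, List.mem_append, h.hvis x]
    constructor
    · rintro ((hb | hq) | hn)
      · exact Or.inl hb
      · exact Or.inr (Or.inl hq)
      · exact Or.inr (Or.inr hn)
    · rintro (hb | (hq | hn))
      · exact Or.inl (Or.inl hb)
      · exact Or.inl (Or.inr hq)
      · exact Or.inr hn
  · exact hndcomb
  · intro x hx
    rw [List.mem_append] at hx
    rcases hx with hx | hx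
    · exact h.hvisS hx
    · have hsst : s ∈ states := h.hvisS (hvisball s hslv.1.1)
      exact hcl s hsst x ((hmemnews x).mp hx).1
  · rw [List.mem_append]
    rintro (hg | hg)
    · exact h.hgoal2 hg
    · rw [List.mem_singleton] at hg
      exact hs hg.symm

-- normal form: either the head layer is nonempty or the whole queue is empty
theorem pvQInv_norm {α : Type} [BEq α] [LawfulBEq α] {succs : α → List α} {goal src : α}
    {states : List α} {d : Nat} {P : List α} {q1 q2 : List (α × Int)} {vis : List α}
    (h : PvQInv succs goal src states d P q1 q2 vis) :
    ∃ d' P' q1' q2', q1 ++ q2 = q1' ++ q2' ∧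
      PvQInv succs goal src states d' P' q1' q2' vis ∧ (q1' = [] → q2' = []) := by
  match hq : q1, q2 with
  | (e :: q1'), q2 => exact ⟨d, P, e :: q1', q2, rfl, h, by simp⟩
  | [], [] => exact ⟨d, P, [], [], rfl, h, by simp⟩
  | [], (e :: q2') =>
    exact ⟨d + 1, [], e :: q2', [], by simp, pvQInv_shift h, by simp⟩

-- ---------- master theorem for A's loop ----------

theorem qloop_master (maps : List String) (n m : Int) (lever : Int × Int)
    (goal src : Int × Int × Int) (states : List (Int × Int × Int))
    (hcl : ∀ p ∈ states, ∀ x ∈ pvNexts maps n m lever p, x ∈ states) :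
    ∀ (fuel : Nat) (d : Nat) (P : List (Int × Int × Int))
      (q1 q2 : List ((Int × Int × Int) × Int)) (vis : List (Int × Int × Int)),
      PvQInv (pvNexts maps n m lever) goal src states d P q1 q2 vis →
      (q1 = [] → q2 = []) →
      states.length + (q1.length + q2.length) + 1 ≤ fuel + vis.length →
      (∀ T : Nat, pvLv (pvNexts maps n m lever) src T goal →
          solutionLoop maps n m lever goal fuel (q1 ++ q2) vis = (T : Int)) ∧
      ((∀ t, ¬ pvBall (pvNexts maps n m lever) src t goal) →
          solutionLoop maps n m lever goal fuel (q1 ++ q2) vis = -1) := by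
  intro fuel
  induction fuel with
  | zero =>
    intro d P q1 q2 vis hinv hnorm hfuel
    have hvislen : vis.length ≤ states.length :=
      List.Subperm.length_le (List.subperm_of_subset hinv.hvisnd hinv.hvisS)
    rcases q1 with _ | ⟨⟨s, τ⟩, q1'⟩
    · have hq2 : q2 = [] := hnorm rfl
      subst hq2
      have hdead := pvQInv_dead hinv
      constructor
      · intro T hT
        exact absurd hT.1 (hdead T)
      · intro _
        rfl
    · exfalso
      simp only [List.length_cons] at hfuel
      omega
  | succ f ih =>
    intro d P q1 q2 vis hinv hnorm hfuel
    rcases q1 with _ | ⟨⟨s, τ⟩, q1'⟩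
    · have hq2 : q2 = [] := hnorm rfl
      subst hq2
      have hdead := pvQInv_dead hinv
      constructor
      · intro T hT
        exact absurd hT.1 (hdead T)
      · intro _
        rfl
    · have hτ : τ = (d : Int) := hinv.ht1 (s, τ) (by simp)
      subst hτ
      have hslv : pvLv (pvNexts maps n m lever) src d s ∧ s ∉ P :=
        (hinv.hq1 s).mp (by simp)
      by_cases hg : s = goal
      · constructor
        · intro T hT
          have hTd : T = d := pvLv_unique _ _ hT (hg ▸ hslv.1)
          subst hTd
          simp [solutionLoop, if_pos hg]
        · intro hT
          exact absurd (hg ▸ hslv.1.1) (hT d)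
      · -- pop and push the new states
        have hstep : solutionLoop maps n m lever goal (f + 1)
            ((((s, (d : Int)) :: q1') ++ q2)) vis =
            solutionLoop maps n m lever goal f
              ((q1' ++ q2) ++ ((pvNews (pvNexts maps n m lever s) vis).map
                (fun x => (x, (d : Int) + 1))))
              (vis ++ pvNews (pvNexts maps n m lever s) vis) := by
          have hfold : (pvNexts maps n m lever s).foldl
              (fun (acc : List ((Int × Int × Int) × Int) × List (Int × Int × Int)) x =>
                if x ∈ acc.2 then acc else (acc.1 ++ [(x, (d : Int) + 1)], acc.2 ++ [x]))
              (q1' ++ q2, vis) =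
              ((q1' ++ q2) ++ (pvNews (pvNexts maps n m lever s) vis).map
                  (fun x => (x, (d : Int) + 1)),
                vis ++ pvNews (pvNexts maps n m lever s) vis) :=
            foldPush (fun x => (x, (d : Int) + 1)) _ _ _
          rw [List.cons_append]
          simp only [solutionLoop]
          rw [if_neg hg, hfold]
        have hinv' := pvQInv_step (q1 := q1') hinv hg hcl
        obtain ⟨d', P', q1'', q2'', happ, hinv'', hnorm''⟩ := pvQInv_norm hinv'
        have hlen : q1''.length + q2''.length =
            q1'.length + q2.length + (pvNews (pvNexts maps n m lever s) vis).length := by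
          have := congrArg List.length happ
          simp only [List.length_append, List.length_map] at this
          omega
        have hfuel' : states.length + (q1''.length + q2''.length) + 1 ≤
            f + (vis ++ pvNews (pvNexts maps n m lever s) vis).length := by
          simp only [List.length_append]
          simp only [List.length_cons] at hfuel
          omega
        have hih := ih d' P' q1'' q2'' (vis ++ pvNews (pvNexts maps n m lever s) vis)
          hinv'' hnorm'' hfuel'
        rw [← happ, ← List.append_assoc] at hih
        rw [hstep]
        exact hih

-- ---------- frontier-BFS invariant and master theorem (B's loop) ----------

def pvGSuccs (maps : List String) (n m : Int) (p : Int × Int) : List (Int × Int) :=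
  (pvDirs.filter (fun dir =>
      is_valid_move (p.1 + dir.1) (p.2 + dir.2) n m maps)).map
    (fun dir => (p.1 + dir.1, p.2 + dir.2))

structure PvFInv (maps : List String) (n m : Int) (dst src : Int × Int)
    (states : List (Int × Int)) (d : Nat) (frontier seen : List (Int × Int)) : Prop where
  hf : ∀ x, x ∈ frontier ↔ pvLv (pvGSuccs maps n m) src d x
  hfnd : frontier.Nodup
  hs : ∀ x, x ∈ seen ↔ pvBall (pvGSuccs maps n m) src d x
  hsnd : seen.Nodup
  hsS : seen ⊆ states
  hdst : ∀ t, t ≤ d → ¬ pvBall (pvGSuccs maps n m) src t dst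

theorem is_valid_move_iff (maps : List String) (n m ny nx : Int) :
    is_valid_move ny nx n m maps = true ↔
      (0 ≤ ny ∧ ny < n ∧ 0 ≤ nx ∧ nx < m ∧ pvCell maps ny nx ≠ some 'X') := by
  simp only [is_valid_move, Bool.and_eq_true, decide_eq_true_eq]
  tauto

-- the inner direction loop of Source B is the simple visited-guarded push over pvGSuccs
theorem bfs_inner_fold (maps : List String) (n m : Int) (p : Int × Int)
    (acc : List (Int × Int) × List (Int × Int)) :
    pvDirs.foldl (fun (acc : List (Int × Int) × List (Int × Int)) dir =>
        let q := (p.1 + dir.1, p.2 + dir.2)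
        if (0 ≤ q.1 ∧ q.1 < n ∧ 0 ≤ q.2 ∧ q.2 < m ∧ pvCell maps q.1 q.2 ≠ some 'X')
            ∧ q ∉ acc.2 then
          (acc.1 ++ [q], acc.2 ++ [q])
        else acc) acc =
      (pvGSuccs maps n m p).foldl (fun (acc : List (Int × Int) × List (Int × Int)) q =>
        if q ∈ acc.2 then acc else (acc.1 ++ [q], acc.2 ++ [q])) acc := by
  rw [pvGSuccs]
  generalize pvDirs = l
  induction l generalizing acc with
  | nil => rfl
  | cons dir l ih =>
    by_cases hv : is_valid_move (p.1 + dir.1) (p.2 + dir.2) n m maps = true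
    · have hfc : List.filter (fun dir => is_valid_move (p.1 + dir.1) (p.2 + dir.2) n m maps)
          (dir :: l) =
          dir :: List.filter (fun dir => is_valid_move (p.1 + dir.1) (p.2 + dir.2) n m maps) l := by
        rw [List.filter_cons, if_pos (by simpa using hv)]
      rw [List.foldl_cons, hfc, List.map_cons, List.foldl_cons]
      dsimp only
      have hvp := (is_valid_move_iff maps n m _ _).mp hv
      by_cases hmem : (p.1 + dir.1, p.2 + dir.2) ∈ acc.2
      · rw [if_neg (by simp [hmem]), if_pos hmem]
        exact ih acc
      · rw [if_pos ⟨hvp, hmem⟩, if_neg hmem]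
        exact ih _
    · have hfc : List.filter (fun dir => is_valid_move (p.1 + dir.1) (p.2 + dir.2) n m maps)
          (dir :: l) =
          List.filter (fun dir => is_valid_move (p.1 + dir.1) (p.2 + dir.2) n m maps) l := by
        rw [List.filter_cons, if_neg (by simpa using hv)]
      rw [List.foldl_cons, hfc]
      dsimp only
      rw [if_neg (fun hc => hv ((is_valid_move_iff maps n m _ _).mpr hc.1))]
      exact ih acc

-- one whole round of Source B's while-loop
theorem bfs_round (maps : List String) (n m : Int) (frontier seen : List (Int × Int)) :
    frontier.foldl (fun (acc : List (Int × Int) × List (Int × Int)) p =>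
      pvDirs.foldl (fun (acc : List (Int × Int) × List (Int × Int)) dir =>
        let q := (p.1 + dir.1, p.2 + dir.2)
        if (0 ≤ q.1 ∧ q.1 < n ∧ 0 ≤ q.2 ∧ q.2 < m ∧ pvCell maps q.1 q.2 ≠ some 'X')
            ∧ q ∉ acc.2 then
          (acc.1 ++ [q], acc.2 ++ [q])
        else acc) acc) ([], seen) =
      (pvNews (frontier.flatMap (pvGSuccs maps n m)) seen,
        seen ++ pvNews (frontier.flatMap (pvGSuccs maps n m)) seen) := by
  have h1 : frontier.foldl (fun (acc : List (Int × Int) × List (Int × Int)) p =>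
      pvDirs.foldl (fun (acc : List (Int × Int) × List (Int × Int)) dir =>
        let q := (p.1 + dir.1, p.2 + dir.2)
        if (0 ≤ q.1 ∧ q.1 < n ∧ 0 ≤ q.2 ∧ q.2 < m ∧ pvCell maps q.1 q.2 ≠ some 'X')
            ∧ q ∉ acc.2 then
          (acc.1 ++ [q], acc.2 ++ [q])
        else acc) acc) ([], seen) =
      frontier.foldl (fun acc p =>
        (pvGSuccs maps n m p).foldl (fun (acc : List (Int × Int) × List (Int × Int)) q =>
          if q ∈ acc.2 then acc else (acc.1 ++ [q], acc.2 ++ [q])) acc) ([], seen) := by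
    apply PySem.List.foldl_congr_mem
    intro acc p _
    exact bfs_inner_fold maps n m p acc
  rw [h1, ← List.foldl_flatMap]
  have h2 := foldPush (fun x : Int × Int => x) (frontier.flatMap (pvGSuccs maps n m)) [] seen
  simpa using h2

theorem floop_master (maps : List String) (n m : Int) (dst src : Int × Int)
    (states : List (Int × Int))
    (hcl : ∀ p, ∀ x ∈ pvGSuccs maps n m p, x ∈ states) :
    ∀ (fuel : Nat) (d : Nat) (frontier seen : List (Int × Int)),
      PvFInv maps n m dst src states d frontier seen →
      states.length + 1 ≤ fuel + seen.length →
      (∀ T : Nat, pvLv (pvGSuccs maps n m) src T dst →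
          bfsLoopAlt maps n m dst fuel frontier seen (d : Int) = (T : Int)) ∧
      ((∀ t, ¬ pvBall (pvGSuccs maps n m) src t dst) →
          bfsLoopAlt maps n m dst fuel frontier seen (d : Int) = -1) := by
  intro fuel
  induction fuel with
  | zero =>
    intro d frontier seen hinv hfuel
    rcases hfr : frontier with _ | ⟨p, fr'⟩
    · subst hfr
      have hempty : ∀ y, ¬ pvLv (pvGSuccs maps n m) src d y := by
        intro y hy
        simpa using (hinv.hf y).mpr hy
      have hunr : ∀ t, ¬ pvBall (pvGSuccs maps n m) src t dst := by
        intro t hb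
        obtain ⟨t', ht', hb'⟩ := pvBall_stab _ _ hempty hb
        exact hinv.hdst t' (by omega) hb'
      exact ⟨fun T hT => absurd hT.1 (hunr T), fun _ => rfl⟩
    · exfalso
      have hslen : seen.length ≤ states.length :=
        List.Subperm.length_le (List.subperm_of_subset hinv.hsnd hinv.hsS)
      omega
  | succ f ih =>
    intro d frontier seen hinv hfuel
    rcases hfr : frontier with _ | ⟨p, fr'⟩
    · subst hfr
      have hempty : ∀ y, ¬ pvLv (pvGSuccs maps n m) src d y := by
        intro y hy
        simpa using (hinv.hf y).mpr hy
      have hunr : ∀ t, ¬ pvBall (pvGSuccs maps n m) src t dst := by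
        intro t hb
        obtain ⟨t', ht', hb'⟩ := pvBall_stab _ _ hempty hb
        exact hinv.hdst t' (by omega) hb'
      exact ⟨fun T hT => absurd hT.1 (hunr T), fun _ => rfl⟩
    · subst hfr
      set L := (p :: fr').flatMap (pvGSuccs maps n m) with hL
      set nxt := pvNews L seen with hnxt
      have hchar : ∀ x, x ∈ nxt ↔ pvLv (pvGSuccs maps n m) src (d + 1) x := by
        intro x
        rw [hnxt, mem_pvNews, hL, List.mem_flatMap]
        constructor
        · rintro ⟨⟨pp, hpp, hx⟩, hxs⟩
          have hplv : pvLv (pvGSuccs maps n m) src d pp := (hinv.hf pp).mp hpp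
          have hnb : ¬ pvBall (pvGSuccs maps n m) src d x := fun hb => hxs ((hinv.hs x).mpr hb)
          refine ⟨pvBall_step _ _ hplv.1 hx, ?_⟩
          intro t ht hbt
          exact hnb (pvBall_mono _ _ (by omega) hbt)
        · intro hlv
          obtain ⟨pp, hplv, hx⟩ := pvLv_pred _ _ hlv
          refine ⟨⟨pp, (hinv.hf pp).mpr hplv, hx⟩, ?_⟩
          intro hxs
          exact hlv.2 d (by omega) ((hinv.hs x).mp hxs)
      have hndcomb := nodup_append_pvNews L seen hinv.hsnd
      have hnddisj := List.nodup_append.mp hndcomb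
      have hLS : ∀ x ∈ L, x ∈ states := by
        intro x hx
        rw [hL, List.mem_flatMap] at hx
        obtain ⟨pp, _, hx⟩ := hx
        exact hcl pp x hx
      have hstep : bfsLoopAlt maps n m dst (f + 1) (p :: fr') seen (d : Int) =
          if dst ∈ nxt then (d : Int) + 1 else bfsLoopAlt maps n m dst f nxt (seen ++ nxt) ((d : Int) + 1) := by
        simp only [bfsLoopAlt]
        rw [bfs_round maps n m (p :: fr') seen]
      by_cases hdmem : dst ∈ nxt
      · rw [hstep, if_pos hdmem]
        have hdlv : pvLv (pvGSuccs maps n m) src (d + 1) dst := (hchar dst).mp hdmem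
        constructor
        · intro T hT
          have : T = d + 1 := pvLv_unique _ _ hT hdlv
          subst this
          push_cast
          ring
        · intro hT
          exact absurd hdlv.1 (hT (d + 1))
      · rw [hstep, if_neg hdmem]
        have hdst' : ∀ t, t ≤ d + 1 → ¬ pvBall (pvGSuccs maps n m) src t dst := by
          intro t ht hb
          rcases Nat.lt_or_ge t (d + 1) with h' | h'
          · exact hinv.hdst t (by omega) hb
          · have : t = d + 1 := by omega
            subst this
            rcases (pvBall_succ_iff_lv _ _ d dst).mp hb with hb' | hlv'
            · exact hinv.hdst d (by omega) hb'
            · exact hdmem ((hchar dst).mpr hlv')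
        by_cases hne : nxt = []
        · have hempty : ∀ y, ¬ pvLv (pvGSuccs maps n m) src (d + 1) y := by
            intro y hy
            have hmem := (hchar y).mpr hy
            rw [hne] at hmem
            simp at hmem
          have hunr : ∀ t, ¬ pvBall (pvGSuccs maps n m) src t dst := by
            intro t hb
            obtain ⟨t', ht', hb'⟩ := pvBall_stab _ _ hempty hb
            exact hdst' t' (by omega) hb'
          rw [hne]
          exact ⟨fun T hT => absurd hT.1 (hunr T), fun _ => by cases f <;> rfl⟩
        · have hinv' : PvFInv maps n m dst src states (d + 1) nxt (seen ++ nxt) := by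
            refine ⟨hchar, hnddisj.2.1, ?_, hndcomb, ?_, hdst'⟩
            · intro x
              rw [List.mem_append, hinv.hs x, pvBall_succ_iff_lv, hchar x]
            · intro x hx
              rw [List.mem_append] at hx
              rcases hx with hx | hx
              · exact hinv.hsS hx
              · exact hLS x ((mem_pvNews L seen x).mp hx).1
          have hfuel' : states.length + 1 ≤ f + (seen ++ nxt).length := by
            rw [List.length_append]
            have : 0 < nxt.length := List.length_pos_of_ne_nil hne
            omega
          have hih := ih (d + 1) nxt (seen ++ nxt) hinv' hfuel'
          have hcast : ((d + 1 : Nat) : Int) = (d : Int) + 1 := by push_cast; ring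
          rw [hcast] at hih
          exact hih

-- ---------- the layered-graph decomposition ----------

-- A's successor relation is the grid relation with the lever flag adjusted
theorem pvNexts_eq_map (maps : List String) (n m : Int) (lever : Int × Int)
    (s : Int × Int × Int) :
    pvNexts maps n m lever s =
      (pvGSuccs maps n m (s.1, s.2.1)).map
        (fun q => (q.1, q.2, if q = lever then 1 else s.2.2)) := by
  rw [pvNexts, PySem.List.foldl_append_if, pvGSuccs, List.map_map, List.nil_append]
  apply List.map_congr_left
  intro dir _
  dsimp only [Function.comp]
  by_cases h : (s.1 + dir.1, s.2.1 + dir.2) = lever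
  · rw [if_pos h, if_pos h]
  · rw [if_neg h, if_neg h]

theorem pvBall_proj (maps : List String) (n m : Int) (lever : Int × Int) (S : Int × Int)
    {d : Nat} {y x k : Int}
    (h : pvBall (pvNexts maps n m lever) (S.1, S.2, 0) d (y, x, k)) :
    pvBall (pvGSuccs maps n m) S d (y, x) := by
  induction d generalizing y x k with
  | zero =>
    simp only [pvBall] at h ⊢
    simp only [Prod.mk.injEq] at h
    simp [h.1, h.2.1]
  | succ d ih =>
    rcases h with h | ⟨p, hp, hx⟩
    · exact Or.inl (ih h)
    · obtain ⟨p1, p2, pk⟩ := p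
      rw [pvNexts_eq_map] at hx
      rw [List.mem_map] at hx
      obtain ⟨q, hq, heq⟩ := hx
      simp only [Prod.mk.injEq] at heq
      right
      refine ⟨(p1, p2), ih hp, ?_⟩
      have : q = (y, x) := by
        obtain ⟨h1, h2, _⟩ := heq
        exact Prod.ext h1 h2
      rwa [this] at hq
  

theorem pvBall_lift (maps : List String) (n m : Int) (lever : Int × Int) (S : Int × Int)
    {d : Nat} {p : Int × Int} (h : pvBall (pvGSuccs maps n m) S d p) :
    ∃ k, (k = 0 ∨ k = 1) ∧ pvBall (pvNexts maps n m lever) (S.1, S.2, 0) d (p.1, p.2, k) := by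
  induction d generalizing p with
  | zero =>
    refine ⟨0, Or.inl rfl, ?_⟩
    simp only [pvBall] at h ⊢
    rw [h]
  | succ d ih =>
    rcases h with h | ⟨q, hq, hp⟩
    · obtain ⟨k, hk01, hk⟩ := ih h
      exact ⟨k, hk01, Or.inl hk⟩
    · obtain ⟨k, hk01, hk⟩ := ih hq
      refine ⟨if p = lever then 1 else k, by by_cases h' : p = lever <;> simp [h', hk01], ?_⟩
      right
      refine ⟨(q.1, q.2, k), hk, ?_⟩
      rw [pvNexts_eq_map]
      rw [List.mem_map]
      exact ⟨p, hp, rfl⟩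
  

theorem pvBall_no_L0 (maps : List String) (n m : Int) (lever : Int × Int) (S : Int × Int)
    (hSL : S ≠ lever) {d : Nat} :
    ¬ pvBall (pvNexts maps n m lever) (S.1, S.2, 0) d (lever.1, lever.2, 0) := by
  induction d with
  | zero =>
    intro h
    simp only [pvBall, Prod.mk.injEq] at h
    exact hSL (Prod.ext h.1.symm h.2.1.symm)
  | succ d ih =>
    rintro (h | ⟨p, hp, hx⟩)
    · exact ih h
    · rw [pvNexts_eq_map, List.mem_map] at hx
      obtain ⟨q, hq, heq⟩ := hx
      simp only [Prod.mk.injEq] at heq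
      obtain ⟨h1, h2, h3⟩ := heq
      have hql : q = lever := Prod.ext h1 h2
      rw [if_pos hql] at h3
      exact absurd h3 (by norm_num)
  

theorem pvBall_decomp (maps : List String) (n m : Int) (lever : Int × Int) (S : Int × Int)
    (hSL : S ≠ lever) (d : Nat) (p : Int × Int) :
    pvBall (pvNexts maps n m lever) (S.1, S.2, 0) d (p.1, p.2, 1) ↔
      ∃ a b, a + b ≤ d ∧ pvBall (pvGSuccs maps n m) S a lever ∧
        pvBall (pvGSuccs maps n m) lever b p := by
  have aux1 : ∀ (a : Nat), pvBall (pvNexts maps n m lever) (S.1, S.2, 0) a (lever.1, lever.2, 1) →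
      ∀ (b : Nat) (p : Int × Int), pvBall (pvGSuccs maps n m) lever b p →
      pvBall (pvNexts maps n m lever) (S.1, S.2, 0) (a + b) (p.1, p.2, 1) := by
    intro a ha b
    induction b with
    | zero =>
      intro p hp
      simp only [pvBall] at hp
      rw [hp]
      simpa using ha
    | succ b ih =>
      rintro p (hp | ⟨q, hq, hp⟩)
      · exact pvBall_mono _ _ (by omega) (ih p hp)
      · have hb := ih q hq
        have : (p.1, p.2, (1 : Int)) ∈ pvNexts maps n m lever (q.1, q.2, 1) := by
          rw [pvNexts_eq_map, List.mem_map]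
          refine ⟨p, hp, ?_⟩
          by_cases h' : p = lever <;> simp [h']
        have := pvBall_step _ _ hb this
        exact (by omega : a + b + 1 = a + (b + 1)) ▸ this
  constructor
  · intro h
    induction d generalizing p with
    | zero =>
      simp only [pvBall, Prod.mk.injEq] at h
      exact absurd h.2.2 (by norm_num)
    | succ d ih =>
      rcases h with h | ⟨sst, hs, hmem⟩
      · obtain ⟨a, b, hab, hA, hB⟩ := ih p h
        exact ⟨a, b, by omega, hA, hB⟩
      · obtain ⟨s1, s2, sk⟩ := sst
        rw [pvNexts_eq_map, List.mem_map] at hmem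
        obtain ⟨q, hq, heq⟩ := hmem
        simp only [Prod.mk.injEq] at heq
        obtain ⟨h1, h2, h3⟩ := heq
        have hqp : q = p := Prod.ext h1 h2
        subst hqp
        by_cases hpl : q = lever
        · have hgs : pvBall (pvGSuccs maps n m) S d (s1, s2) := pvBall_proj maps n m lever S hs
          refine ⟨d + 1, 0, by omega, pvBall_step _ _ hgs (hpl ▸ hq), ?_⟩
          simpa [pvBall] using hpl
        · rw [if_neg hpl] at h3
          have hsk : sk = 1 := h3
          subst hsk
          obtain ⟨a, b, hab, hA, hB⟩ := ih (s1, s2) hs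
          exact ⟨a, b + 1, by omega, hA, pvBall_step _ _ hB hq⟩
  · rintro ⟨a, b, hab, hA, hB⟩
    obtain ⟨k, hk01, hk⟩ := pvBall_lift maps n m lever S hA
    have hk1 : k = 1 := by
      rcases hk01 with rfl | rfl
      · exact absurd hk (pvBall_no_L0 maps n m lever S hSL)
      · rfl
    subst hk1
    exact pvBall_mono _ _ hab (aux1 a hk b p hB)
  

-- ---------- the two point-finders agree, and the found cells carry their letters ----------

theorem pvFP_inner (i : Int) (l : List (Int × Char)) :
    ∀ (d : PySem.Dict Char (Option (Int × Int)))
      (t : Option (Int × Int) × Option (Int × Int) × Option (Int × Int)),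
      d.getD 'S' none = t.1 → d.getD 'E' none = t.2.1 → d.getD 'L' none = t.2.2 →
      (∀ c, d.contains c = ('S' == c || 'E' == c || 'L' == c)) →
      ((l.foldl (fun d (jc : Int × Char) =>
          if d.contains jc.2 then d.insert jc.2 (some (i, jc.1)) else d) d).getD 'S' none =
        (l.foldl (fun (acc : Option (Int × Int) × Option (Int × Int) × Option (Int × Int)) jc =>
          if jc.2 = 'S' then (some (i, jc.1), acc.2.1, acc.2.2)
          else if jc.2 = 'E' then (acc.1, some (i, jc.1), acc.2.2)
          else if jc.2 = 'L' then (acc.1, acc.2.1, some (i, jc.1))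
          else acc) t).1 ∧
      (l.foldl (fun d (jc : Int × Char) =>
          if d.contains jc.2 then d.insert jc.2 (some (i, jc.1)) else d) d).getD 'E' none =
        (l.foldl (fun (acc : Option (Int × Int) × Option (Int × Int) × Option (Int × Int)) jc =>
          if jc.2 = 'S' then (some (i, jc.1), acc.2.1, acc.2.2)
          else if jc.2 = 'E' then (acc.1, some (i, jc.1), acc.2.2)
          else if jc.2 = 'L' then (acc.1, acc.2.1, some (i, jc.1))
          else acc) t).2.1 ∧
      (l.foldl (fun d (jc : Int × Char) =>
          if d.contains jc.2 then d.insert jc.2 (some (i, jc.1)) else d) d).getD 'L' none =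
        (l.foldl (fun (acc : Option (Int × Int) × Option (Int × Int) × Option (Int × Int)) jc =>
          if jc.2 = 'S' then (some (i, jc.1), acc.2.1, acc.2.2)
          else if jc.2 = 'E' then (acc.1, some (i, jc.1), acc.2.2)
          else if jc.2 = 'L' then (acc.1, acc.2.1, some (i, jc.1))
          else acc) t).2.2 ∧
      (∀ c, (l.foldl (fun d (jc : Int × Char) =>
          if d.contains jc.2 then d.insert jc.2 (some (i, jc.1)) else d) d).contains c =
        ('S' == c || 'E' == c || 'L' == c))) := by
  induction l with
  | nil => exact fun d t h1 h2 h3 h4 => ⟨h1, h2, h3, h4⟩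
  | cons jc l ih =>
    intro d t h1 h2 h3 h4
    obtain ⟨j, c⟩ := jc
    simp only [List.foldl_cons]
    by_cases hS : c = 'S'
    · subst hS
      rw [if_pos (by rw [h4]; decide), if_pos rfl]
      refine ih _ _ ?_ ?_ ?_ ?_
      · rw [PySem.Dict.getD_insert]; simp
      · rw [PySem.Dict.getD_insert]; simp [h2]
      · rw [PySem.Dict.getD_insert]; simp [h3]
      · intro c
        rw [PySem.Dict.contains_insert, h4]
        by_cases hc : c = 'S'
        · simp [hc]
        · simp [beq_iff_eq, hc, Ne.symm hc]
    · by_cases hE : c = 'E'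
      · subst hE
        rw [if_pos (by rw [h4]; decide), if_neg (by decide), if_pos rfl]
        refine ih _ _ ?_ ?_ ?_ ?_
        · rw [PySem.Dict.getD_insert]; simp [h1]
        · rw [PySem.Dict.getD_insert]; simp
        · rw [PySem.Dict.getD_insert]; simp [h3]
        · intro c
          rw [PySem.Dict.contains_insert, h4]
          by_cases hc : c = 'E'
          · simp [hc]
          · simp [beq_iff_eq, hc, Ne.symm hc]
      · by_cases hL : c = 'L'
        · subst hL
          rw [if_pos (by rw [h4]; decide), if_neg (by decide), if_neg (by decide), if_pos rfl]
          refine ih _ _ ?_ ?_ ?_ ?_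
          · rw [PySem.Dict.getD_insert]; simp [h1]
          · rw [PySem.Dict.getD_insert]; simp [h2]
          · rw [PySem.Dict.getD_insert]; simp
          · intro c
            rw [PySem.Dict.contains_insert, h4]
            by_cases hc : c = 'L'
            · simp [hc]
            · simp [beq_iff_eq, hc, Ne.symm hc]
        · rw [if_neg (by rw [h4]; simp [Ne.symm hS, Ne.symm hE, Ne.symm hL]),
            if_neg hS, if_neg hE, if_neg hL]
          exact ih d t h1 h2 h3 h4

theorem pvFP_outer (rows : List (Int × String)) :
    ∀ (d : PySem.Dict Char (Option (Int × Int)))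
      (t : Option (Int × Int) × Option (Int × Int) × Option (Int × Int)),
      d.getD 'S' none = t.1 → d.getD 'E' none = t.2.1 → d.getD 'L' none = t.2.2 →
      (∀ c, d.contains c = ('S' == c || 'E' == c || 'L' == c)) →
      ((rows.foldl (fun d ir =>
          (PySem.List.enumerate ir.2.toList).foldl (fun d jc =>
            if d.contains jc.2 then d.insert jc.2 (some (ir.1, jc.1)) else d) d) d).getD 'S' none =
        (rows.foldl (fun acc ir =>
          (PySem.List.enumerate ir.2.toList).foldl
            (fun (acc : Option (Int × Int) × Option (Int × Int) × Option (Int × Int)) jc =>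
              if jc.2 = 'S' then (some (ir.1, jc.1), acc.2.1, acc.2.2)
              else if jc.2 = 'E' then (acc.1, some (ir.1, jc.1), acc.2.2)
              else if jc.2 = 'L' then (acc.1, acc.2.1, some (ir.1, jc.1))
              else acc) acc) t).1 ∧
      (rows.foldl (fun d ir =>
          (PySem.List.enumerate ir.2.toList).foldl (fun d jc =>
            if d.contains jc.2 then d.insert jc.2 (some (ir.1, jc.1)) else d) d) d).getD 'E' none =
        (rows.foldl (fun acc ir =>
          (PySem.List.enumerate ir.2.toList).foldl
            (fun (acc : Option (Int × Int) × Option (Int × Int) × Option (Int × Int)) jc =>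
              if jc.2 = 'S' then (some (ir.1, jc.1), acc.2.1, acc.2.2)
              else if jc.2 = 'E' then (acc.1, some (ir.1, jc.1), acc.2.2)
              else if jc.2 = 'L' then (acc.1, acc.2.1, some (ir.1, jc.1))
              else acc) acc) t).2.1 ∧
      (rows.foldl (fun d ir =>
          (PySem.List.enumerate ir.2.toList).foldl (fun d jc =>
            if d.contains jc.2 then d.insert jc.2 (some (ir.1, jc.1)) else d) d) d).getD 'L' none =
        (rows.foldl (fun acc ir =>
          (PySem.List.enumerate ir.2.toList).foldl
            (fun (acc : Option (Int × Int) × Option (Int × Int) × Option (Int × Int)) jc =>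
              if jc.2 = 'S' then (some (ir.1, jc.1), acc.2.1, acc.2.2)
              else if jc.2 = 'E' then (acc.1, some (ir.1, jc.1), acc.2.2)
              else if jc.2 = 'L' then (acc.1, acc.2.1, some (ir.1, jc.1))
              else acc) acc) t).2.2 ∧
      (∀ c, (rows.foldl (fun d ir =>
          (PySem.List.enumerate ir.2.toList).foldl (fun d jc =>
            if d.contains jc.2 then d.insert jc.2 (some (ir.1, jc.1)) else d) d) d).contains c =
        ('S' == c || 'E' == c || 'L' == c))) := by
  induction rows with
  | nil => exact fun d t h1 h2 h3 h4 => ⟨h1, h2, h3, h4⟩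
  | cons ir rows ih =>
    intro d t h1 h2 h3 h4
    simp only [List.foldl_cons]
    obtain ⟨h1', h2', h3', h4'⟩ :=
      pvFP_inner ir.1 (PySem.List.enumerate ir.2.toList) d t h1 h2 h3 h4
    exact ih _ _ h1' h2' h3' h4'

theorem fp_eq (maps : List String) : find_points maps = find_points_alt maps := by
  rw [find_points, find_points_alt]
  obtain ⟨h1, h2, h3, _⟩ := pvFP_outer (PySem.List.enumerate maps)
    (PySem.Dict.ofList [('S', none), ('E', none), ('L', none)]) (none, none, none)
    (by decide) (by decide) (by decide)
    (by
      intro c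
      simp [PySem.Dict.ofList, PySem.Dict.contains, PySem.Dict.update, PySem.Dict.insert,
        PySem.Dict.empty, Bool.or_assoc])
  rw [h1, h2, h3]

def pvGood (maps : List String) (c : Char) (o : Option (Int × Int)) : Prop :=
  ∀ p : Int × Int, o = some p →
    ∃ row, PySem.List.pyGet? maps p.1 = some row ∧ 0 ≤ p.1 ∧
      0 ≤ p.2 ∧ p.2 < (row.toList.length : Int) ∧ PySem.Str.pyGet? row p.2 = some c

theorem pvGood_inner (maps : List String) (i : Int) (row : String)
    (hrow : PySem.List.pyGet? maps i = some row) (hi : 0 ≤ i) (l : List (Int × Char))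
    (hl : ∀ jc ∈ l, 0 ≤ jc.1 ∧ jc.1 < (row.toList.length : Int) ∧
      PySem.Str.pyGet? row jc.1 = some jc.2) :
    ∀ t : Option (Int × Int) × Option (Int × Int) × Option (Int × Int),
      pvGood maps 'S' t.1 → pvGood maps 'E' t.2.1 → pvGood maps 'L' t.2.2 →
      (pvGood maps 'S' (l.foldl (fun (acc : Option (Int × Int) × Option (Int × Int) × Option (Int × Int)) jc =>
          if jc.2 = 'S' then (some (i, jc.1), acc.2.1, acc.2.2)
          else if jc.2 = 'E' then (acc.1, some (i, jc.1), acc.2.2)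
          else if jc.2 = 'L' then (acc.1, acc.2.1, some (i, jc.1))
          else acc) t).1 ∧
        pvGood maps 'E' (l.foldl (fun (acc : Option (Int × Int) × Option (Int × Int) × Option (Int × Int)) jc =>
          if jc.2 = 'S' then (some (i, jc.1), acc.2.1, acc.2.2)
          else if jc.2 = 'E' then (acc.1, some (i, jc.1), acc.2.2)
          else if jc.2 = 'L' then (acc.1, acc.2.1, some (i, jc.1))
          else acc) t).2.1 ∧
        pvGood maps 'L' (l.foldl (fun (acc : Option (Int × Int) × Option (Int × Int) × Option (Int × Int)) jc =>
          if jc.2 = 'S' then (some (i, jc.1), acc.2.1, acc.2.2)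
          else if jc.2 = 'E' then (acc.1, some (i, jc.1), acc.2.2)
          else if jc.2 = 'L' then (acc.1, acc.2.1, some (i, jc.1))
          else acc) t).2.2) := by
  induction l with
  | nil => exact fun t h1 h2 h3 => ⟨h1, h2, h3⟩
  | cons jc l ih =>
    intro t h1 h2 h3
    have hjc := hl jc (by simp)
    have hl' : ∀ jc ∈ l, 0 ≤ jc.1 ∧ jc.1 < (row.toList.length : Int) ∧
        PySem.Str.pyGet? row jc.1 = some jc.2 := fun e he => hl e (by simp [he])
    obtain ⟨j, c⟩ := jc
    simp only [List.foldl_cons]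
    have hnew : ∀ ch : Char, c = ch → pvGood maps ch (some (i, j)) := by
      rintro ch rfl p hp
      have hp' : p = (i, j) := by simpa using hp.symm
      subst hp'
      exact ⟨row, hrow, hi, hjc.1, hjc.2.1, hjc.2.2⟩
    by_cases hS : c = 'S'
    · rw [if_pos hS]
      exact ih hl' _ (hnew 'S' hS) h2 h3
    · rw [if_neg hS]
      by_cases hE : c = 'E'
      · rw [if_pos hE]
        exact ih hl' _ h1 (hnew 'E' hE) h3
      · rw [if_neg hE]
        by_cases hL : c = 'L'
        · rw [if_pos hL]
          exact ih hl' _ h1 h2 (hnew 'L' hL)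
        · rw [if_neg hL]
          exact ih hl' _ h1 h2 h3

theorem pvGood_fp_alt (maps : List String) :
    pvGood maps 'S' (find_points_alt maps).1 ∧ pvGood maps 'E' (find_points_alt maps).2.1 ∧
      pvGood maps 'L' (find_points_alt maps).2.2 := by
  rw [find_points_alt]
  have main : ∀ rows : List (Int × String),
      (∀ ir ∈ rows, 0 ≤ ir.1 ∧ PySem.List.pyGet? maps ir.1 = some ir.2) →
      ∀ t : Option (Int × Int) × Option (Int × Int) × Option (Int × Int),
      pvGood maps 'S' t.1 → pvGood maps 'E' t.2.1 → pvGood maps 'L' t.2.2 →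
      (pvGood maps 'S' (rows.foldl (fun acc ir =>
          (PySem.List.enumerate ir.2.toList).foldl
            (fun (acc : Option (Int × Int) × Option (Int × Int) × Option (Int × Int)) jc =>
              if jc.2 = 'S' then (some (ir.1, jc.1), acc.2.1, acc.2.2)
              else if jc.2 = 'E' then (acc.1, some (ir.1, jc.1), acc.2.2)
              else if jc.2 = 'L' then (acc.1, acc.2.1, some (ir.1, jc.1))
              else acc) acc) t).1 ∧
        pvGood maps 'E' (rows.foldl (fun acc ir =>
          (PySem.List.enumerate ir.2.toList).foldl
            (fun (acc : Option (Int × Int) × Option (Int × Int) × Option (Int × Int)) jc =>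
              if jc.2 = 'S' then (some (ir.1, jc.1), acc.2.1, acc.2.2)
              else if jc.2 = 'E' then (acc.1, some (ir.1, jc.1), acc.2.2)
              else if jc.2 = 'L' then (acc.1, acc.2.1, some (ir.1, jc.1))
              else acc) acc) t).2.1 ∧
        pvGood maps 'L' (rows.foldl (fun acc ir =>
          (PySem.List.enumerate ir.2.toList).foldl
            (fun (acc : Option (Int × Int) × Option (Int × Int) × Option (Int × Int)) jc =>
              if jc.2 = 'S' then (some (ir.1, jc.1), acc.2.1, acc.2.2)
              else if jc.2 = 'E' then (acc.1, some (ir.1, jc.1), acc.2.2)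
              else if jc.2 = 'L' then (acc.1, acc.2.1, some (ir.1, jc.1))
              else acc) acc) t).2.2) := by
    intro rows
    induction rows with
    | nil => exact fun _ t h1 h2 h3 => ⟨h1, h2, h3⟩
    | cons ir rows ih =>
      intro hr t h1 h2 h3
      have hir := hr ir (by simp)
      simp only [List.foldl_cons]
      have hl : ∀ jc ∈ PySem.List.enumerate ir.2.toList 0, 0 ≤ jc.1 ∧
          jc.1 < (ir.2.toList.length : Int) ∧ PySem.Str.pyGet? ir.2 jc.1 = some jc.2 := by
        intro jc hjc
        rw [PySem.List.mem_enumerate_iff] at hjc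
        obtain ⟨k, hk, rfl⟩ := hjc
        refine ⟨by simp, by simpa using hk, ?_⟩
        have : (0 : Int) + (k : Int) = ((k : Nat) : Int) := by ring
        rw [this, PySem.Str.pyGet?_natCast]
        simp [List.getElem?_eq_getElem hk]
      obtain ⟨g1, g2, g3⟩ := pvGood_inner maps ir.1 ir.2 hir.2 hir.1
        (PySem.List.enumerate ir.2.toList) hl t h1 h2 h3
      exact ih (fun e he => hr e (by simp [he])) _ g1 g2 g3
  refine main (PySem.List.enumerate maps) ?_ (none, none, none)
    (by intro p hp; simp at hp) (by intro p hp; simp at hp) (by intro p hp; simp at hp)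
  intro ir hir
  rw [PySem.List.mem_enumerate_iff] at hir
  obtain ⟨k, hk, rfl⟩ := hir
  refine ⟨by simp, ?_⟩
  have : (0 : Int) + (k : Int) = ((k : Nat) : Int) := by ring
  rw [this, PySem.List.pyGet?_natCast]
  simp [List.getElem?_eq_getElem hk]

-- ---------- the state space ----------

def pvCells (nn mm : Nat) : List (Int × Int) :=
  (List.range nn).flatMap (fun (i : Nat) => (List.range mm).map (fun (j : Nat) => ((i : Int), (j : Int))))

def pvCellsK (nn mm : Nat) : List (Int × Int × Int) :=
  (pvCells nn mm).flatMap (fun p => [(p.1, p.2, 0), (p.1, p.2, 1)])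

theorem mem_pvCells (nn mm : Nat) (p : Int × Int) :
    p ∈ pvCells nn mm ↔ 0 ≤ p.1 ∧ p.1 < (nn : Int) ∧ 0 ≤ p.2 ∧ p.2 < (mm : Int) := by
  obtain ⟨y, x⟩ := p
  constructor
  · intro h
    rw [pvCells, List.mem_flatMap] at h
    obtain ⟨i, hi, h⟩ := h
    rw [List.mem_range] at hi
    rw [List.mem_map] at h
    obtain ⟨j, hj, h⟩ := h
    rw [List.mem_range] at hj
    simp only [Prod.mk.injEq] at h
    obtain ⟨rfl, rfl⟩ := h
    dsimp only
    refine ⟨Int.natCast_nonneg i, by exact_mod_cast hi, Int.natCast_nonneg j, by exact_mod_cast hj⟩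
  · rintro ⟨h1, h2, h3, h4⟩
    rw [pvCells, List.mem_flatMap]
    refine ⟨y.toNat, by rw [List.mem_range]; omega, ?_⟩
    rw [List.mem_map]
    refine ⟨x.toNat, by rw [List.mem_range]; omega, ?_⟩
    simp [Int.toNat_of_nonneg h1, Int.toNat_of_nonneg h3]

theorem length_pvCells (nn mm : Nat) : (pvCells nn mm).length = nn * mm := by
  rw [pvCells, List.length_flatMap]
  simp only [List.length_map, List.length_range, List.map_const']
  rw [List.sum_replicate, smul_eq_mul]

theorem mem_pvCellsK (nn mm : Nat) (s : Int × Int × Int) :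
    s ∈ pvCellsK nn mm ↔
      (0 ≤ s.1 ∧ s.1 < (nn : Int) ∧ 0 ≤ s.2.1 ∧ s.2.1 < (mm : Int)) ∧
        (s.2.2 = 0 ∨ s.2.2 = 1) := by
  obtain ⟨y, x, k⟩ := s
  simp only [pvCellsK, List.mem_flatMap, List.mem_cons, List.not_mem_nil, or_false]
  constructor
  · rintro ⟨p, hp, h | h⟩ <;>
    · simp only [Prod.mk.injEq] at h
      obtain ⟨rfl, rfl, rfl⟩ := h
      have := (mem_pvCells nn mm p).mp hp
      simp_all
  · rintro ⟨⟨h1, h2, h3, h4⟩, hk⟩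
    refine ⟨(y, x), (mem_pvCells nn mm (y, x)).mpr ⟨h1, h2, h3, h4⟩, ?_⟩
    rcases hk with rfl | rfl
    · exact Or.inl rfl
    · exact Or.inr rfl

theorem length_pvCellsK (nn mm : Nat) : (pvCellsK nn mm).length = 2 * nn * mm := by
  rw [pvCellsK, List.length_flatMap]
  simp only [List.length_cons, List.length_nil, List.map_const']
  rw [List.sum_replicate, smul_eq_mul, length_pvCells]
  ring

-- ===== VERDICT (by name: the statement is the Claim_ definition above) =====
theorem solution_spec : Claim_equal_solution := by
  intro maps _ hpre
  obtain ⟨hne, hrectImp⟩ := hpre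
  show solution maps = solution_alt maps
  simp only [solution, solution_alt, fp_eq maps, PySem.List.len_eq, PySem.Str.len_eq]
  have hgood := pvGood_fp_alt maps
  rcases hfp : find_points_alt maps with ⟨os, oe, ol⟩
  rcases os with _ | S
  · rfl
  rcases oe with _ | E
  · rfl
  rcases ol with _ | L
  · rfl
  rw [hfp] at hgood
  set nn := maps.length with hnn
  set mm := (maps.headD "").toList.length with hmm
  have hpres : ∀ (c : Char) (p : Int × Int), pvGood maps c (some p) → ∃ r ∈ maps, c ∈ r.toList := by
    intro c p hg
    obtain ⟨row, hrow, _, _, _, hcell⟩ := hg p rfl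
    refine ⟨row, PySem.List.mem_of_pyGet?_eq_some maps hrow, ?_⟩
    simp only [PySem.Str.pyGet?_eq, PySem.Chars.pyGet?_eq_listPyGet?] at hcell
    exact PySem.List.mem_of_pyGet?_eq_some _ hcell
  have hrowlen : ∀ r ∈ maps, r.toList.length = mm :=
    hrectImp ⟨hpres 'S' S (by simpa using hgood.1), hpres 'E' E (by simpa using hgood.2.1),
      hpres 'L' L (by simpa using hgood.2.2)⟩
  -- facts about the three found cells
  have extract : ∀ (c : Char) (p : Int × Int), pvGood maps c (some p) →
      pvCell maps p.1 p.2 = some c ∧ 0 ≤ p.1 ∧ p.1 < (nn : Int) ∧ 0 ≤ p.2 ∧ p.2 < (mm : Int) := by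
    intro c p hg
    obtain ⟨row, hrow, hy, hx, hxlen, hcell⟩ := hg p rfl
    have hrow' : maps[p.1.toNat]? = some row := by
      rw [← PySem.List.pyGet?_of_nonneg maps hy, hrow]
    have hlt : p.1.toNat < nn := (List.getElem?_eq_some_iff.mp hrow').1
    have hmem : row ∈ maps := PySem.List.mem_of_pyGet?_eq_some maps hrow
    have hrl : row.toList.length = mm := hrowlen row hmem
    refine ⟨?_, hy, by omega, hx, by rw [hrl] at hxlen; exact hxlen⟩
    rw [pvCell, hrow]
    simpa using hcell
  obtain ⟨hcS, hS1, hS2, hS3, hS4⟩ := extract 'S' S (by simpa using hgood.1)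
  obtain ⟨hcE, hE1, hE2, hE3, hE4⟩ := extract 'E' E (by simpa using hgood.2.1)
  obtain ⟨hcL, hL1, hL2, hL3, hL4⟩ := extract 'L' L (by simpa using hgood.2.2)
  have hSL : S ≠ L := by
    intro hh
    rw [hh, hcL] at hcS
    simp at hcS
  have hLE : L ≠ E := by
    intro hh
    rw [hh, hcE] at hcL
    simp at hcL
  -- closure of the successor maps in the finite state spaces
  have hclG : ∀ (p x : Int × Int), x ∈ pvGSuccs maps (nn : Int) (mm : Int) p →
      x ∈ pvCells nn mm := by
    intro p x hx
    rw [pvGSuccs, List.mem_map] at hx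
    obtain ⟨dir, hdir, rfl⟩ := hx
    rw [List.mem_filter] at hdir
    have hv := (is_valid_move_iff maps _ _ _ _).mp hdir.2
    rw [mem_pvCells]
    exact ⟨hv.1, hv.2.1, hv.2.2.1, hv.2.2.2.1⟩
  have hclP : ∀ p ∈ pvCellsK nn mm,
      ∀ x ∈ pvNexts maps (nn : Int) (mm : Int) L p, x ∈ pvCellsK nn mm := by
    intro p hp x hx
    rw [pvNexts_eq_map, List.mem_map] at hx
    obtain ⟨q, hq, rfl⟩ := hx
    have hq' := hclG (p.1, p.2.1) q hq
    rw [mem_pvCells] at hq'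
    rw [mem_pvCellsK] at hp ⊢
    refine ⟨hq', ?_⟩
    by_cases hql : q = L
    · rw [if_pos hql]
      exact Or.inr rfl
    · rw [if_neg hql]
      exact hp.2
  -- the grid BFS interpretation of both programs
  have hQinit : PvQInv (pvNexts maps (nn : Int) (mm : Int) L) (E.1, E.2, 1) (S.1, S.2, 0)
      (pvCellsK nn mm) 0 [] [((S.1, S.2, 0), 0)] [] [(S.1, S.2, 0)] := by
    refine ⟨?_, ?_, ?_, ?_, ?_, ?_, ?_, ?_, ?_, ?_, ?_, ?_, ?_⟩
    · intro e he
      simp only [List.mem_singleton] at he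
      rw [he]
      simp
    · simp
    · simp
    · simp
    · intro x
      rw [pvLv_zero]
      simp
    · simp
    · simp
    · simp
    · intro x
      simp [pvBall]
    · simp
    · intro x hx
      simp only [List.mem_singleton] at hx
      rw [hx, mem_pvCellsK]
      exact ⟨⟨hS1, hS2, hS3, hS4⟩, Or.inl rfl⟩
    · omega
    · simp
  have hQ := qloop_master maps (nn : Int) (mm : Int) L (E.1, E.2, 1) (S.1, S.2, 0)
    (pvCellsK nn mm) hclP (2 * nn * mm + 1) 0 []
    [((S.1, S.2, 0), 0)] [] [(S.1, S.2, 0)] hQinit (by simp)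
    (by rw [length_pvCellsK]; simp)
  simp only [List.append_nil] at hQ
  have hFinit : ∀ (src dst : Int × Int), src ≠ dst →
      (0 ≤ src.1 ∧ src.1 < (nn : Int) ∧ 0 ≤ src.2 ∧ src.2 < (mm : Int)) →
      PvFInv maps (nn : Int) (mm : Int) dst src (pvCells nn mm) 0 [src] [src] := by
    intro src dst hsd hsrc
    refine ⟨?_, by simp, ?_, by simp, ?_, ?_⟩
    · intro x
      rw [pvLv_zero]
      simp
    · intro x
      simp [pvBall]
    · intro x hx
      simp only [List.mem_singleton] at hx
      rw [hx, mem_pvCells]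
      exact hsrc
    · intro t ht
      have ht0 : t = 0 := by omega
      subst ht0
      simp only [pvBall]
      exact fun hh => hsd hh.symm
  have hF1 := floop_master maps (nn : Int) (mm : Int) L S (pvCells nn mm)
    (hclG) (nn * mm + 1) 0 [S] [S]
    (hFinit S L hSL ⟨hS1, hS2, hS3, hS4⟩) (by rw [length_pvCells]; simp)
  have hF2 := floop_master maps (nn : Int) (mm : Int) E L (pvCells nn mm)
    (hclG) (nn * mm + 1) 0 [L] [L]
    (hFinit L E hLE ⟨hL1, hL2, hL3, hL4⟩) (by rw [length_pvCells]; simp)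
  rw [Nat.cast_zero] at hF1 hF2
  dsimp only
  rw [if_neg hSL, if_neg hLE]
  by_cases h1 : ∃ t, pvBall (pvGSuccs maps (nn : Int) (mm : Int)) S t L
  · obtain ⟨t0, hb0⟩ := h1
    obtain ⟨t1, _, hlv1⟩ := pvBall_exists_lv _ _ hb0
    have hbfs1 := hF1.1 t1 hlv1
    by_cases h2 : ∃ t, pvBall (pvGSuccs maps (nn : Int) (mm : Int)) L t E
    · obtain ⟨u0, hb20⟩ := h2
      obtain ⟨t2, _, hlv2⟩ := pvBall_exists_lv _ _ hb20
      have hbfs2 := hF2.1 t2 hlv2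
      have hlvA : pvLv (pvNexts maps (nn : Int) (mm : Int) L) (S.1, S.2, 0) (t1 + t2)
          (E.1, E.2, 1) := by
        constructor
        · exact (pvBall_decomp maps (nn : Int) (mm : Int) L S hSL (t1 + t2) E).mpr
            ⟨t1, t2, le_rfl, hlv1.1, hlv2.1⟩
        · intro u hu hbu
          obtain ⟨a, b, hab, hA, hB⟩ :=
            (pvBall_decomp maps (nn : Int) (mm : Int) L S hSL u E).mp hbu
          have ha : t1 ≤ a := by
            by_contra hca
            exact hlv1.2 a (by omega) hA
          have hb : t2 ≤ b := by
            by_contra hcb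
            exact hlv2.2 b (by omega) hB
          omega
      rw [hQ.1 (t1 + t2) hlvA, hbfs1, hbfs2]
      rw [if_neg (by omega : ¬ ((t1 : Int) = -1)), if_neg (by omega : ¬ ((t2 : Int) = -1))]
      push_cast
      ring
    · have hAunr : ∀ t, ¬ pvBall (pvNexts maps (nn : Int) (mm : Int) L) (S.1, S.2, 0) t
          (E.1, E.2, 1) := by
        intro t hbt
        obtain ⟨a, b, _, _, hB⟩ :=
          (pvBall_decomp maps (nn : Int) (mm : Int) L S hSL t E).mp hbt
        exact h2 ⟨b, hB⟩
      have hbfs2 := hF2.2 (fun t hb => h2 ⟨t, hb⟩)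
      rw [hQ.2 hAunr, hbfs1, hbfs2]
      rw [if_neg (by omega : ¬ ((t1 : Int) = -1)), if_pos rfl]
  · have hAunr : ∀ t, ¬ pvBall (pvNexts maps (nn : Int) (mm : Int) L) (S.1, S.2, 0) t
        (E.1, E.2, 1) := by
      intro t hbt
      obtain ⟨a, b, _, hA, _⟩ :=
        (pvBall_decomp maps (nn : Int) (mm : Int) L S hSL t E).mp hbt
      exact h1 ⟨a, hA⟩
    have hbfs1 := hF1.2 (fun t hb => h1 ⟨t, hb⟩)
    rw [hQ.2 hAunr, hbfs1, if_pos rfl]
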